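-- pv_equiv track=rewrite | github.com/karellopez/MEGqc | meg_qc/plotting/meg_qc_group_qc_plots.py | _summary_shared_controls_panel_html
-- ===== SOURCE A (Python) =====
-- def _summary_shared_controls_panel_html(summary_group_id: str) -> str:
--     """Single shared controller panel for the summary-strip QC plots."""
--
--     def _buttons(kind: str, *, n: int = 8, active_level: int = 4) -> str:
--         return "".join(
--             f"<button class='plot-control-btn{' active' if i == active_level else ''}' "
--             f"data-summary-kind='{kind}' data-level='{i}'>{i}</button>"
--             for i in range(1, n + 1)
--         )
--
--     return (
--         f"<div class='summary-shared-controls' data-summary-group='{summary_group_id}'>"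
--         "<div class='plot-control-group'>"
--         "<div class='plot-control-title'>Line thickness level</div>"
--         f"<div class='plot-control-row'>{_buttons('line')}</div>"
--         "</div>"
--         "<div class='plot-control-group'>"
--         "<div class='plot-control-title'>Dot size level</div>"
--         f"<div class='plot-control-row'>{_buttons('dot')}</div>"
--         "</div>"
--         "<div class='plot-control-group'>"
--         "<div class='plot-control-title'>Axis label/ticks size level</div>"
--         f"<div class='plot-control-row'>{_buttons('axis')}</div>"
--         "</div>"
--         "<div class='plot-control-group'>"
--         "<div class='plot-control-title'>Dot visibility</div>"
--         "<div class='plot-control-row'>"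
--         "<button class='plot-control-btn active' data-summary-kind='dotvis' data-level='1'>Show dots</button>"
--         "<button class='plot-control-btn' data-summary-kind='dotvis' data-level='0'>Hide dots</button>"
--         "</div>"
--         "</div>"
--         "<div class='plot-control-group'>"
--         "<div class='plot-control-title'>Dot displacement level</div>"
--         f"<div class='plot-control-row'>{_buttons('disp', n=12, active_level=1)}</div>"
--         "</div>"
--         "</div>"
--     )
-- ===== SOURCE B (Python) =====
-- def _summary_shared_controls_panel_html(summary_group_id: str) -> str:
--     """Build the control panel as an explicit element tree (a tiny HTML AST),
--     then serialize the tree with a recursive renderer."""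
--
--     def el(tag, attrs, children):
--         return ("el", tag, attrs, children)
--
--     def text(s):
--         return ("text", s, None, None)
--
--     def render(node):
--         kind, tag, attrs, children = node
--         if kind == "text":
--             return tag
--         attr_s = ""
--         for k, v in attrs:
--             attr_s += " " + k + "='" + v + "'"
--         inner = ""
--         for c in children:
--             inner += render(c)
--         return "<" + tag + attr_s + ">" + inner + "</" + tag + ">"
--
--     def button(kind, level, label, active):
--         return el("button",
--                   [("class", "plot-control-btn" + (" active" if active else "")),
--                    ("data-summary-kind", kind),
--                    ("data-level", str(level))],
--                   [text(label)])
--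
--     def group(title, row_children):
--         return el("div", [("class", "plot-control-group")],
--                   [el("div", [("class", "plot-control-title")], [text(title)]),
--                    el("div", [("class", "plot-control-row")], row_children)])
--
--     tree = el(
--         "div",
--         [("class", "summary-shared-controls"),
--          ("data-summary-group", summary_group_id)],
--         [group("Line thickness level",
--                [button("line", i, str(i), i == 4) for i in range(1, 9)]),
--          group("Dot size level",
--                [button("dot", i, str(i), i == 4) for i in range(1, 9)]),
--          group("Axis label/ticks size level",
--                [button("axis", i, str(i), i == 4) for i in range(1, 9)]),
--          group("Dot visibility",
--                [button("dotvis", 1, "Show dots", True),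
--                 button("dotvis", 0, "Hide dots", False)]),
--          group("Dot displacement level",
--                [button("disp", i, str(i), i == 1) for i in range(1, 13)])])
--     return render(tree)
-- ===== Notes on version B (the rewrite author's own statement) =====
-- stated objective: alternative
-- what changed: B builds the panel as an explicit HTML element tree (text/element nodes with tag, attribute list, children) and serializes the tree with a recursive renderer, instead of A's inline f-string concatenation with a per-call button helper.
import Mathlib
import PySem

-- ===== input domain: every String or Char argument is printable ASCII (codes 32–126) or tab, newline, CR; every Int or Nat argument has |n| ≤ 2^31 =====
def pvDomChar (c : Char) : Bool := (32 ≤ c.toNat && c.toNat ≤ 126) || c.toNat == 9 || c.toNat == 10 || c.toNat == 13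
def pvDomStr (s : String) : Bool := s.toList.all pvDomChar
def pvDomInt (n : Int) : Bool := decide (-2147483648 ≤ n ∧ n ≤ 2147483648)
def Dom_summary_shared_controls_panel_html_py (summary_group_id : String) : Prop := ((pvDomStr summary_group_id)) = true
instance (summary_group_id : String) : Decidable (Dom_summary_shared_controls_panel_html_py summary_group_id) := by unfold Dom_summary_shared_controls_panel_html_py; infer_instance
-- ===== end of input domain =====

-- B builds the panel as an explicit HTML element tree and serializes it recursively, instead of A's inline string concatenation (alternative decomposition; same output byte for byte).

-- ===== PORT A =====
-- _buttons(kind, n=8, active_level=4): "".join over range(1, n+1)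
def pvButtonsA (kind : String) (n : Int) (active_level : Int) : String :=
  PySem.Str.join "" ((PySem.List.pyRange 1 (n + 1) 1).map (fun i =>
    "<button class='plot-control-btn" ++ (if i == active_level then " active" else "") ++ "' " ++
    "data-summary-kind='" ++ kind ++ "' data-level='" ++ PySem.Int.toStr i ++ "'>" ++
    PySem.Int.toStr i ++ "</button>"))

def summary_shared_controls_panel_html_py (summary_group_id : String) : String :=
  "<div class='summary-shared-controls' data-summary-group='" ++ summary_group_id ++ "'>" ++
  "<div class='plot-control-group'>" ++
  "<div class='plot-control-title'>Line thickness level</div>" ++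
  "<div class='plot-control-row'>" ++ pvButtonsA "line" 8 4 ++ "</div>" ++
  "</div>" ++
  "<div class='plot-control-group'>" ++
  "<div class='plot-control-title'>Dot size level</div>" ++
  "<div class='plot-control-row'>" ++ pvButtonsA "dot" 8 4 ++ "</div>" ++
  "</div>" ++
  "<div class='plot-control-group'>" ++
  "<div class='plot-control-title'>Axis label/ticks size level</div>" ++
  "<div class='plot-control-row'>" ++ pvButtonsA "axis" 8 4 ++ "</div>" ++
  "</div>" ++
  "<div class='plot-control-group'>" ++
  "<div class='plot-control-title'>Dot visibility</div>" ++
  "<div class='plot-control-row'>" ++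
  "<button class='plot-control-btn active' data-summary-kind='dotvis' data-level='1'>Show dots</button>" ++
  "<button class='plot-control-btn' data-summary-kind='dotvis' data-level='0'>Hide dots</button>" ++
  "</div>" ++
  "</div>" ++
  "<div class='plot-control-group'>" ++
  "<div class='plot-control-title'>Dot displacement level</div>" ++
  "<div class='plot-control-row'>" ++ pvButtonsA "disp" 12 1 ++ "</div>" ++
  "</div>" ++
  "</div>"

-- ===== PORT B =====
-- tiny HTML AST: text nodes and elements carrying a tag, an attribute list and a child list
mutual
inductive PvNode where
  | text : String → PvNode
  | el : String → List (String × String) → PvNodeList → PvNode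
inductive PvNodeList where
  | nil : PvNodeList
  | cons : PvNode → PvNodeList → PvNodeList
end

def PvNodeList.ofList : List PvNode → PvNodeList
  | [] => .nil
  | n :: rest => .cons n (PvNodeList.ofList rest)

-- for k, v in attrs: attr_s += " " + k + "='" + v + "'"
def pvRenderAttrs : List (String × String) → String
  | [] => ""
  | (k, v) :: rest => " " ++ k ++ "='" ++ v ++ "'" ++ pvRenderAttrs rest

mutual
def pvRender : PvNode → String
  | .text s => s
  | .el tag attrs kids => "<" ++ tag ++ pvRenderAttrs attrs ++ ">" ++ pvRenderList kids ++ "</" ++ tag ++ ">"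
def pvRenderList : PvNodeList → String
  | .nil => ""
  | .cons c rest => pvRender c ++ pvRenderList rest
end

def pvButton (kind : String) (level : Int) (label : String) (active : Bool) : PvNode :=
  .el "button"
    [("class", "plot-control-btn" ++ (if active then " active" else "")),
     ("data-summary-kind", kind),
     ("data-level", PySem.Int.toStr level)]
    (.cons (.text label) .nil)

def pvGroup (title : String) (row : PvNodeList) : PvNode :=
  .el "div" [("class", "plot-control-group")]
    (.cons (.el "div" [("class", "plot-control-title")] (.cons (.text title) .nil))
      (.cons (.el "div" [("class", "plot-control-row")] row) .nil))

-- [button(kind, i, str(i), i == active) for i in range(1, n+1)]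
def pvSliderRow (kind : String) (n : Int) (active : Int) : PvNodeList :=
  PvNodeList.ofList ((PySem.List.pyRange 1 (n + 1) 1).map
    (fun i => pvButton kind i (PySem.Int.toStr i) (i == active)))

def summary_shared_controls_panel_html_py_alt (summary_group_id : String) : String :=
  pvRender (.el "div"
    [("class", "summary-shared-controls"), ("data-summary-group", summary_group_id)]
    (PvNodeList.ofList
      [pvGroup "Line thickness level" (pvSliderRow "line" 8 4),
       pvGroup "Dot size level" (pvSliderRow "dot" 8 4),
       pvGroup "Axis label/ticks size level" (pvSliderRow "axis" 8 4),
       pvGroup "Dot visibility" (PvNodeList.ofList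
         [pvButton "dotvis" 1 "Show dots" true, pvButton "dotvis" 0 "Hide dots" false]),
       pvGroup "Dot displacement level" (pvSliderRow "disp" 12 1)]))

-- ===== PRECONDITION & SPEC =====
def Spec_summary_shared_controls_panel_html_py (summary_group_id : String) (out : String) : Prop := out = summary_shared_controls_panel_html_py_alt summary_group_id
instance (summary_group_id : String) (out : String) : Decidable (Spec_summary_shared_controls_panel_html_py summary_group_id out) := by unfold Spec_summary_shared_controls_panel_html_py; infer_instance

-- ===== CLAIM =====
def Claim_equal_summary_shared_controls_panel_html_py : Prop := ∀ (summary_group_id : String), Dom_summary_shared_controls_panel_html_py summary_group_id → Spec_summary_shared_controls_panel_html_py summary_group_id (summary_shared_controls_panel_html_py summary_group_id)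

-- ===== LEMMAS AND PROOFS =====
theorem pv_str_ext (x y : String) (h : x.toList = y.toList) : x = y := String.toList_inj.mp h

theorem pv_join_cons (x : String) (xs : List String) :
    PySem.Str.join "" (x :: xs) = x ++ PySem.Str.join "" xs := by
  cases xs with
  | nil => simp [PySem.Str.join, PySem.Chars.join, List.intercalate]
  | cons y ys => simp [PySem.Str.join, PySem.Chars.join, List.intercalate]

-- one button of B's tree renders to A's button string
theorem pv_btn_eq (kind : String) (i act : Int) :
    pvRender (pvButton kind i (PySem.Int.toStr i) (i == act)) =
      "<button class='plot-control-btn" ++ (if i == act then " active" else "") ++ "' " ++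
      "data-summary-kind='" ++ kind ++ "' data-level='" ++ PySem.Int.toStr i ++ "'>" ++
      PySem.Int.toStr i ++ "</button>" := by
  apply pv_str_ext
  by_cases h : (i == act) = true <;>
    simp [pvButton, pvRender, pvRenderList, pvRenderAttrs, h]

-- B's child-list renderer over an ofList is A's "".join of the rendered nodes
theorem pv_renderList_ofList (l : List PvNode) :
    pvRenderList (PvNodeList.ofList l) = PySem.Str.join "" (l.map pvRender) := by
  induction l with
  | nil => simp [PvNodeList.ofList, pvRenderList, PySem.Str.join, PySem.Chars.join, List.intercalate]
  | cons x xs ih => simp [PvNodeList.ofList, pvRenderList, ih, pv_join_cons]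

-- a slider row of B renders to A's _buttons output
theorem pv_row_eq (kind : String) (n act : Int) :
    pvRenderList (pvSliderRow kind n act) = pvButtonsA kind n act := by
  unfold pvSliderRow pvButtonsA
  rw [pv_renderList_ofList, List.map_map]
  congr 1
  refine List.map_congr_left fun i _ => ?_
  simpa [Function.comp] using pv_btn_eq kind i act

-- the fixed dot-visibility row
set_option maxRecDepth 8192 in
set_option maxHeartbeats 1000000 in
theorem pv_dotvis_eq :
    pvRenderList (PvNodeList.ofList
        [pvButton "dotvis" 1 "Show dots" true, pvButton "dotvis" 0 "Hide dots" false]) =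
      "<button class='plot-control-btn active' data-summary-kind='dotvis' data-level='1'>Show dots</button>" ++
      "<button class='plot-control-btn' data-summary-kind='dotvis' data-level='0'>Hide dots</button>" := by
  decide

-- a group of B's tree renders to A's fused chunks (title concrete, row symbolic)
theorem pv_group_eq (title : String) (titleDiv : String) (row : PvNodeList) (rowS : String)
    (ht : "<div class='plot-control-title'>" ++ title ++ "</div>" = titleDiv)
    (hr : pvRenderList row = rowS) :
    pvRender (pvGroup title row) =
      "<div class='plot-control-group'>" ++ titleDiv ++
      "<div class='plot-control-row'>" ++ rowS ++ "</div>" ++ "</div>" := by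
  subst ht hr
  apply pv_str_ext
  simp [pvGroup, pvRender, pvRenderList, pvRenderAttrs]

-- the outer wrapper fuses to A's head literal
theorem pv_head_eq (s x : String) :
    "<" ++ "div" ++ pvRenderAttrs
        [("class", "summary-shared-controls"), ("data-summary-group", s)] ++ ">" ++ x ++ "</" ++ "div" ++ ">" =
      "<div class='summary-shared-controls' data-summary-group='" ++ s ++ "'>" ++ x ++ "</div>" := by
  apply pv_str_ext
  simp [pvRenderAttrs]

-- the whole equality, assembled group by group
theorem pv_eq (s : String) :
    summary_shared_controls_panel_html_py s = summary_shared_controls_panel_html_py_alt s := by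
  unfold summary_shared_controls_panel_html_py summary_shared_controls_panel_html_py_alt
  rw [show PvNodeList.ofList
      [pvGroup "Line thickness level" (pvSliderRow "line" 8 4),
       pvGroup "Dot size level" (pvSliderRow "dot" 8 4),
       pvGroup "Axis label/ticks size level" (pvSliderRow "axis" 8 4),
       pvGroup "Dot visibility" (PvNodeList.ofList
         [pvButton "dotvis" 1 "Show dots" true, pvButton "dotvis" 0 "Hide dots" false]),
       pvGroup "Dot displacement level" (pvSliderRow "disp" 12 1)] =
      PvNodeList.cons (pvGroup "Line thickness level" (pvSliderRow "line" 8 4))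
        (PvNodeList.cons (pvGroup "Dot size level" (pvSliderRow "dot" 8 4))
          (PvNodeList.cons (pvGroup "Axis label/ticks size level" (pvSliderRow "axis" 8 4))
            (PvNodeList.cons (pvGroup "Dot visibility" (PvNodeList.ofList
                [pvButton "dotvis" 1 "Show dots" true, pvButton "dotvis" 0 "Hide dots" false]))
              (PvNodeList.cons (pvGroup "Dot displacement level" (pvSliderRow "disp" 12 1))
                PvNodeList.nil)))) from rfl]
  rw [pvRender, pvRenderList, pvRenderList, pvRenderList, pvRenderList, pvRenderList, pvRenderList]
  rw [pv_group_eq "Line thickness level" "<div class='plot-control-title'>Line thickness level</div>"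
        _ _ rfl (pv_row_eq "line" 8 4),
      pv_group_eq "Dot size level" "<div class='plot-control-title'>Dot size level</div>"
        _ _ rfl (pv_row_eq "dot" 8 4),
      pv_group_eq "Axis label/ticks size level" "<div class='plot-control-title'>Axis label/ticks size level</div>"
        _ _ rfl (pv_row_eq "axis" 8 4),
      pv_group_eq "Dot visibility" "<div class='plot-control-title'>Dot visibility</div>"
        _ _ rfl pv_dotvis_eq,
      pv_group_eq "Dot displacement level" "<div class='plot-control-title'>Dot displacement level</div>"
        _ _ rfl (pv_row_eq "disp" 12 1)]
  rw [pv_head_eq]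
  simp only [String.append_assoc, String.append_empty]

-- ===== VERDICT =====

theorem summary_shared_controls_panel_html_py_spec : Claim_equal_summary_shared_controls_panel_html_py := by
  intro s _
  exact pv_eq s
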